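-- pv_equiv track=rewrite | github.com/mikehozio/pwl | pwl.py | score_skins
-- ===== SOURCE A (Python) =====
-- def score_skins(daily_scores, PLAYERS):
--     """Skins scoring: only outright winners get paid.
--     Bounty resets to 1 for each win, no minimum for an outright win."""
--     bounty = 1
--
--     for wordle_number, scores in sorted(daily_scores.items()):
--         if not scores:
--             continue
--
--         # Find the minimum score for this day
--         min_score = min(scores.values())
--         winners = [player for player, score in scores.items() if score == min_score]
--
--         if len(winners) == 1:
--             # Outright winner gets the bounty (no minimum)
--             PLAYERS[winners[0]]["score"] += bounty
--             PLAYERS[winners[0]]["wins"] += 1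
--             bounty = 1  # Reset bounty
--         else:
--             # Any tie: no points awarded, bounty increases
--             bounty += 1
--
--     return bounty
-- ===== SOURCE B (Python) =====
-- def score_skins(daily_scores, PLAYERS):
--     """Skins scoring, sort-based: rank each day's scores ascending; there is an
--     outright winner iff the two lowest ranked scores differ, and the winner is
--     the first-ranked player."""
--     bounty = 1
--
--     for _wordle_number, scores in sorted(daily_scores.items()):
--         ranked = sorted(scores.items(), key=lambda kv: kv[1])
--         if not ranked:
--             continue
--
--         if len(ranked) == 1 or ranked[0][1] < ranked[1][1]:
--             winner = ranked[0][0]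
--             PLAYERS[winner]["score"] += bounty
--             PLAYERS[winner]["wins"] += 1
--             bounty = 1
--         else:
--             bounty += 1
--
--     return bounty
-- ===== Notes on version B (the rewrite author's own statement) =====
-- stated objective: alternative
-- what changed: Per day, A computes min(scores.values()) and then a winners list-comprehension and tests len(winners)==1; B instead stably sorts the day's items by score and decides the outright winner by comparing the two lowest ranked entries (unique minimum iff ranked[0] < ranked[1]).
import Mathlib
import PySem

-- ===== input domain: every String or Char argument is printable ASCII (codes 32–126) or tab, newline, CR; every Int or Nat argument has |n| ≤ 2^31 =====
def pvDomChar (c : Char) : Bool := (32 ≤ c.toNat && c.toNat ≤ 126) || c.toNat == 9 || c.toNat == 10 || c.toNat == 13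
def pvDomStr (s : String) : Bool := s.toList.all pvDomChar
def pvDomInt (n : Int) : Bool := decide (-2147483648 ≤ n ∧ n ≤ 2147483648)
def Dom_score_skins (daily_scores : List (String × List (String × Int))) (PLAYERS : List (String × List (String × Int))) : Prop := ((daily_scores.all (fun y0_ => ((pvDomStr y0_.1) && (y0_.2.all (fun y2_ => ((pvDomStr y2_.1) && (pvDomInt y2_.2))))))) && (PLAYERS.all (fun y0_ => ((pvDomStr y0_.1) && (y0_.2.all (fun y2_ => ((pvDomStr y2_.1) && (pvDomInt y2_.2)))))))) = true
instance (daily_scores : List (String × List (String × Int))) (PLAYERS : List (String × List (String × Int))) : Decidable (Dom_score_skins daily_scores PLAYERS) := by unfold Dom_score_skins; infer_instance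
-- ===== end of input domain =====

-- B (objective: alternative) replaces A's per-day min()+winners-comprehension by sorting the day's
-- scores and inspecting the two lowest entries. Both Pythons mutate PLAYERS identically; the
-- equivalence proved here is about the return value only (the ports track the returned bounty:
-- PLAYERS is only written to, never read for the result).

-- ===== PORT A =====
-- sorted(daily_scores.items()) compares (key, value) tuples, but dict keys are distinct, so it is
-- a sort by key. min(scores.values()) is total here (guarded by the empty check), so getD 0 is
-- exact; the PLAYERS["score"/"wins"] updates raise KeyError where Pre_ excludes.
def score_skins (daily_scores : List (String × List (String × Int))) (PLAYERS : List (String × List (String × Int))) : Int :=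
  (PySem.List.sorted (PySem.Dict.ofList daily_scores).items (fun p => p.1) false).foldl
    (fun bounty day =>
      let scores := PySem.Dict.ofList day.2
      if scores.items.isEmpty then bounty
      else
        let min_score := (PySem.List.min? scores.values (fun v => v)).getD 0
        let winners := (scores.items.filter (fun p => p.2 == min_score)).map (fun p => p.1)
        if winners.length == 1 then (1 : Int) else bounty + 1)
    1

-- ===== PORT B =====
def score_skins_alt (daily_scores : List (String × List (String × Int))) (PLAYERS : List (String × List (String × Int))) : Int :=
  (PySem.List.sorted (PySem.Dict.ofList daily_scores).items (fun p => p.1) false).foldl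
    (fun bounty day =>
      match PySem.List.sorted (PySem.Dict.ofList day.2).items (fun kv => kv.2) false with
      | [] => bounty
      | [_] => (1 : Int)
      | x :: y :: _ => if x.2 < y.2 then (1 : Int) else bounty + 1)
    1

-- ===== PRECONDITION & SPEC =====
-- Pre_ excludes exactly the inputs on which the Python A raises KeyError: some day (of the
-- deduplicated daily_scores dict) has an outright winner — a unique minimal score — whose player
-- is missing from the PLAYERS dict or whose entry lacks a "score" or "wins" key.
def Pre_score_skins (daily_scores : List (String × List (String × Int))) (PLAYERS : List (String × List (String × Int))) : Prop :=
  ∀ day ∈ (PySem.Dict.ofList daily_scores).items,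
    ∀ q ∈ (PySem.Dict.ofList day.2).items,
      ((∀ r ∈ (PySem.Dict.ofList day.2).items, q.2 ≤ r.2) ∧
        (PySem.Dict.ofList day.2).items.countP (fun r => r.2 == q.2) = 1) →
      ∃ e ∈ (PySem.Dict.ofList PLAYERS).items, e.1 = q.1 ∧
        (∃ x ∈ e.2, x.1 = "score") ∧ (∃ x ∈ e.2, x.1 = "wins")
instance (daily_scores : List (String × List (String × Int))) (PLAYERS : List (String × List (String × Int))) : Decidable (Pre_score_skins daily_scores PLAYERS) := by unfold Pre_score_skins; infer_instance

def pvWitness_score_skins : (List (String × List (String × Int))) × (List (String × List (String × Int))) :=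
  ([("1", [("a", 3), ("b", 4)]), ("2", [("a", 2), ("b", 2)])],
   [("a", [("score", 0), ("wins", 0)]), ("b", [("score", 0), ("wins", 0)])])

def Spec_score_skins (daily_scores : List (String × List (String × Int))) (PLAYERS : List (String × List (String × Int))) (out : Int) : Prop := out = score_skins_alt daily_scores PLAYERS
instance (daily_scores : List (String × List (String × Int))) (PLAYERS : List (String × List (String × Int))) (out : Int) : Decidable (Spec_score_skins daily_scores PLAYERS out) := by unfold Spec_score_skins; infer_instance

-- ===== CLAIM (what is proved, stated in full; the proofs are below) =====
def Claim_equal_score_skins : Prop := ∀ (daily_scores : List (String × List (String × Int))) (PLAYERS : List (String × List (String × Int))), Dom_score_skins daily_scores PLAYERS → Pre_score_skins daily_scores PLAYERS → Spec_score_skins daily_scores PLAYERS (score_skins daily_scores PLAYERS)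

-- ===== LEMMAS AND PROOFS =====

-- One day of A's loop equals one day of B's loop, for any bounty and any scores-items list.
theorem day_step_eq (b : Int) (l : List (String × Int)) :
    (if l.isEmpty then b
     else
       let min_score := (PySem.List.min? (l.map Prod.snd) (fun v => v)).getD 0
       let winners := (l.filter (fun p => p.2 == min_score)).map (fun p => p.1)
       if winners.length == 1 then (1 : Int) else b + 1)
    = (match PySem.List.sorted l (fun kv => kv.2) false with
       | [] => b
       | [_] => (1 : Int)
       | x :: y :: _ => if x.2 < y.2 then (1 : Int) else b + 1) := by
  rcases hs : PySem.List.sorted l (fun kv => kv.2) false with _ | ⟨x, t⟩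
  · have hl : l = [] := (PySem.List.sorted_eq_nil_iff l _ false).mp hs
    subst hl; simp
  · have hperm := PySem.List.sorted_perm l (fun kv => kv.2) false
    rw [hs] at hperm
    have hne : l.isEmpty = false := by
      rcases l with _ | ⟨a, l'⟩
      · exact absurd hperm.length_eq (by simp)
      · rfl
    have hxl : x ∈ l := hperm.subset List.mem_cons_self
    have hmin : ∀ y ∈ l, x.2 ≤ y.2 := PySem.List.key_head_sorted_le l _ hs
    obtain ⟨m, hm⟩ : ∃ m, PySem.List.min? (l.map Prod.snd) (fun v => v) = some m := by
      cases h : PySem.List.min? (l.map Prod.snd) (fun v => v) with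
      | none =>
          have hl0 : l.map Prod.snd = [] := (PySem.List.min?_eq_none_iff _ _).mp h
          rw [List.map_eq_nil_iff] at hl0
          subst hl0; cases hxl
      | some m => exact ⟨m, rfl⟩
    obtain ⟨p, hp, hpm⟩ := List.mem_map.mp (PySem.List.min?_mem hm)
    have hmx : m = x.2 :=
      le_antisymm (PySem.List.min?_isMin hm x.2 (List.mem_map_of_mem hxl))
        (hpm ▸ hmin p hp)
    have hcnt : (l.filter (fun p => p.2 == m)).length = (x :: t).countP (fun p => p.2 == m) := by
      rw [← List.countP_eq_length_filter]
      exact (hperm.countP_eq _).symm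
    rcases t with _ | ⟨y, t'⟩
    · have h1 : (l.filter (fun p => p.2 == m)).length = 1 := by
        rw [hcnt]; simp [hmx]
      simp [hne, hm, h1]
    · have hpw := PySem.List.sorted_pairwise l (fun kv => kv.2)
      rw [hs, List.pairwise_cons] at hpw
      obtain ⟨hx_all, hpw2⟩ := hpw
      rw [List.pairwise_cons] at hpw2
      obtain ⟨hy_all, _⟩ := hpw2
      have hxy : x.2 ≤ y.2 := hx_all y List.mem_cons_self
      by_cases hlt : x.2 < y.2
      · have h1 : (l.filter (fun p => p.2 == m)).length = 1 := by
          have h0 : (y :: t').countP (fun p => p.2 == m) = 0 := by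
            rw [List.countP_eq_zero]
            intro z hz
            rcases List.mem_cons.mp hz with rfl | hz'
            · simp [hmx]; omega
            · have hyz := hy_all z hz'
              simp [hmx]; omega
          rw [hcnt, List.countP_cons, h0]
          simp [hmx]
        simp [hne, hm, h1, hlt]
      · have hyx : y.2 = x.2 := le_antisymm (not_lt.mp hlt) hxy
        have h2 : 2 ≤ (l.filter (fun p => p.2 == m)).length := by
          rw [hcnt, List.countP_cons, List.countP_cons]
          simp [hmx, hyx]
        have hF : ((l.filter (fun p => p.2 == m)).length == 1) = false := by
          simp only [beq_eq_false_iff_ne, ne_eq]; omega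
        simp [hne, hm, hF, hlt]

theorem pvWitness_ok : Dom_score_skins pvWitness_score_skins.1 pvWitness_score_skins.2 ∧
    Pre_score_skins pvWitness_score_skins.1 pvWitness_score_skins.2 := by
  constructor <;> decide

-- ===== VERDICT (by name: the statement is the Claim_ definition above) =====
theorem score_skins_spec : Claim_equal_score_skins := by
  intro ds PLAYERS _ _
  unfold Spec_score_skins score_skins score_skins_alt
  refine PySem.List.foldl_congr_mem _ _ _ _ ?_
  intro b day _
  have h := day_step_eq b (PySem.Dict.ofList day.2).items
  simpa [PySem.Dict.values] using h
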